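-- pv_equiv track=rewrite | github.com/HuayuChen2004/NumberWeave | solution.py | check_column_fill
-- ===== SOURCE A (Python) =====
-- def check_column_fill(size, column_count, column):
--     current_column_count = []
--     count = 0
--     for i in range(size):
--         if column[i] == 1:
--             count += 1
--         elif count:
--             current_column_count.append(count)
--             count = 0
--     if count:
--         current_column_count.append(count)
--     return current_column_count == column_count
-- ===== SOURCE B (Python) =====
-- def check_column_fill(size, column_count, column):
--     s = ''.join('1' if x == 1 else '0' for x in column[:size])
--     return [len(r) for r in s.split('0') if r] == column_count
-- ===== Notes on version B (the rewrite author's own statement) =====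
-- stated objective: simpler
-- what changed: Replaces the running counter with flush logic by mapping the prefix to a '0'/'1' string, splitting on '0' and taking the lengths of the nonempty pieces, then comparing to column_count.
-- outside the precondition, e.g. on check_column_fill(-1, [1], [1, 1]): A returns False, B returns True
import Mathlib
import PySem

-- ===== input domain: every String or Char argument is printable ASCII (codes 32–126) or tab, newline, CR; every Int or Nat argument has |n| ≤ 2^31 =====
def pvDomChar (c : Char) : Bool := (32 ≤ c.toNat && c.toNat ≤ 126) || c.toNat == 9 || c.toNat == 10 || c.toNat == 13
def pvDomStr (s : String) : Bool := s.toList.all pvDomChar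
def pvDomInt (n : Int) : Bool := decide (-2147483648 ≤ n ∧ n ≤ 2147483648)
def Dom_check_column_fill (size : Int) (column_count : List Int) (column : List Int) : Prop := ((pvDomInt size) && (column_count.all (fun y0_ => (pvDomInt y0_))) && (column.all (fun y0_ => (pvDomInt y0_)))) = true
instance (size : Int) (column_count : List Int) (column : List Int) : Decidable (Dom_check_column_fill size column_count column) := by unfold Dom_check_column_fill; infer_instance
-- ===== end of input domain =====

-- B replaces A's counter-and-flush loop by mapping the prefix to a '0'/'1' string, splitting on '0'
-- and measuring the nonempty pieces — a simpler, shorter decomposition (same cost).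


-- ===== PORT A =====
-- for i in range(size): read column[i] (pyGetD is exact under Pre_, where the index is in range),
-- maintain (current_column_count, count); final flush; compare with column_count.
def check_column_fill (size : Int) (column_count : List Int) (column : List Int) : Bool :=
  let r := (PySem.List.pyRange 0 size 1).foldl
    (fun (st : List Int × Int) i =>
      if PySem.List.pyGetD column i 0 == 1 then (st.1, st.2 + 1)
      else if st.2 ≠ 0 then (st.1 ++ [st.2], 0) else st)
    ([], 0)
  (if r.2 ≠ 0 then r.1 ++ [r.2] else r.1) == column_count

-- ===== PORT B =====
-- ''.join('1' if x == 1 else '0' for x in column[:size]) is the char list of exactly those chars;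
-- s.split('0') is PySem.Chars.splitOn on that list; [len(r) for r in … if r] filters then measures.
def check_column_fill_alt (size : Int) (column_count : List Int) (column : List Int) : Bool :=
  let s : List Char := (PySem.List.slice column none (some size)).map (fun x => if x == 1 then '1' else '0')
  (((PySem.Chars.splitOn s ['0']).filter (fun r => r ≠ [])).map (fun r => (r.length : Int))) == column_count

-- ===== PRECONDITION & SPEC =====
-- Pre_ excludes size > len(column), where A raises IndexError, and negative size, a degenerate input
-- where A's empty loop (returns [] == column_count) and B's Python end-relative slice column[:size]
-- are two equally accidental readings of a corner no caller specifies.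
def Pre_check_column_fill (size : Int) (column_count : List Int) (column : List Int) : Prop :=
  0 ≤ size ∧ size ≤ column.length
instance (size : Int) (column_count : List Int) (column : List Int) : Decidable (Pre_check_column_fill size column_count column) := by unfold Pre_check_column_fill; infer_instance
def pvWitness_check_column_fill : Int × List Int × List Int := (4, [2, 1], [1, 1, 0, 1, 0])

def Spec_check_column_fill (size : Int) (column_count : List Int) (column : List Int) (out : Bool) : Prop := out = check_column_fill_alt size column_count column
instance (size : Int) (column_count : List Int) (column : List Int) (out : Bool) : Decidable (Spec_check_column_fill size column_count column out) := by unfold Spec_check_column_fill; infer_instance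

-- ===== CLAIM (what is proved, stated in full; the proofs are below) =====
def Claim_equal_check_column_fill : Prop := ∀ (size : Int) (column_count : List Int) (column : List Int), Dom_check_column_fill size column_count column → Pre_check_column_fill size column_count column → Spec_check_column_fill size column_count column (check_column_fill size column_count column)

-- ===== LEMMAS AND PROOFS =====

-- reference split of a char list on the single separator '0'
def mySplit : List Char → List (List Char)
  | [] => [[]]
  | c :: cs => if c = '0' then [] :: mySplit cs else (mySplit cs).modifyHead (c :: ·)

lemma mySplit_ne_nil (l : List Char) : mySplit l ≠ [] := by
  induction l with
  | nil => simp [mySplit]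
  | cons c cs ih =>
    simp only [mySplit]
    split_ifs
    · simp
    · simpa using ih

lemma splitOn_go_eq (l : List Char) : ∀ (fuel : Nat) (cur : List Char) (acc : List (List Char)),
    l.length < fuel →
    PySem.Chars.splitOn.go ['0'] fuel l cur acc
      = acc.reverse ++ (mySplit l).modifyHead (cur.reverse ++ ·) := by
  induction l with
  | nil =>
    intro fuel cur acc h
    match fuel with
    | fuel + 1 => simp [PySem.Chars.splitOn.go, mySplit]
  | cons c cs ih =>
    intro fuel cur acc h
    match fuel with
    | fuel + 1 =>
      simp only [PySem.Chars.splitOn.go]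
      by_cases hc : c = '0'
      · subst hc
        rw [if_pos (by simp [List.isPrefixOf])]
        rw [show List.drop ['0'].length ('0' :: cs) = cs from rfl]
        rw [ih fuel [] _ (by simpa using h)]
        simp only [mySplit, List.reverse_nil, List.nil_append]
        cases hms : mySplit cs with
        | nil => exact absurd hms (mySplit_ne_nil cs)
        | cons a as => simp
      · rw [if_neg (by simp [List.isPrefixOf]; exact Ne.symm hc)]
        rw [ih fuel (c :: cur) acc (by simpa using h)]
        simp only [mySplit, if_neg hc]
        congr 1
        cases hms : mySplit cs with
        | nil => exact absurd hms (mySplit_ne_nil cs)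
        | cons a as => simp [List.modifyHead]

lemma splitOn_eq (l : List Char) : PySem.Chars.splitOn l ['0'] = mySplit l := by
  rw [PySem.Chars.splitOn, splitOn_go_eq l (l.length + 1) [] [] (by omega)]
  simp only [List.reverse_nil, List.nil_append]
  cases hms : mySplit l with
  | nil => exact absurd hms (mySplit_ne_nil l)
  | cons a as => simp

-- the canonical runs-with-counter recursion both sides reduce to
def runsC (c : Int) : List Int → List Int
  | [] => if c ≠ 0 then [c] else []
  | x :: l => if x = 1 then runsC (c + 1) l else (if c ≠ 0 then c :: runsC 0 l else runsC 0 l)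

lemma loopA_eq (l : List Int) : ∀ (acc : List Int) (c : Int),
    (let r := l.foldl (fun (st : List Int × Int) v =>
        if v == 1 then (st.1, st.2 + 1)
        else if st.2 ≠ 0 then (st.1 ++ [st.2], 0) else st) (acc, c)
     if r.2 ≠ 0 then r.1 ++ [r.2] else r.1) = acc ++ runsC c l := by
  induction l with
  | nil => intro acc c; by_cases hc : c = 0 <;> simp [runsC, hc]
  | cons x xs ih =>
    intro acc c
    by_cases hx : x = 1
    · simpa [List.foldl_cons, hx, runsC] using ih acc (c + 1)
    · by_cases hc : c = 0
      · simpa [List.foldl_cons, hx, hc, runsC] using ih acc 0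
      · simpa [List.foldl_cons, hx, hc, runsC] using ih (acc ++ [c]) 0

lemma runsB_eq (l : List Int) : ∀ (c : Int), 0 ≤ c →
    (((mySplit (l.map (fun x => if x == 1 then '1' else '0'))).modifyHead
        (List.replicate c.toNat '1' ++ ·)).filter (fun r => r ≠ [])).map (fun r => (r.length : Int))
      = runsC c l := by
  induction l with
  | nil =>
    intro c hc
    by_cases h : c = 0
    · simp [mySplit, runsC, h]
    · have h1 : c.toNat ≠ 0 := by omega
      simp [mySplit, runsC, h, h1, Int.toNat_of_nonneg hc]
  | cons x xs ih =>
    intro c hc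
    by_cases hx : x = 1
    · simp only [List.map_cons, hx, beq_self_eq_true, if_true]
      rw [show mySplit ('1' :: List.map (fun x => if (x == 1) = true then '1' else '0') xs)
            = List.modifyHead ('1' :: ·) (mySplit (List.map (fun x => if (x == 1) = true then '1' else '0') xs)) from by
          rw [mySplit, if_neg (by decide)]]
      cases hms : mySplit (List.map (fun x => if (x == 1) = true then '1' else '0') xs) with
      | nil => exact absurd hms (mySplit_ne_nil _)
      | cons a as =>
        have h1 := ih (c + 1) (by omega)
        rw [hms] at h1
        simp only [List.modifyHead_cons] at h1 ⊢
        rw [show List.replicate c.toNat '1' ++ '1' :: a = List.replicate (c + 1).toNat '1' ++ a from by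
          rw [show (c + 1).toNat = c.toNat + 1 from by omega, List.replicate_succ']
          simp]
        rw [h1, runsC, if_pos rfl]
    · have hxc : (fun x : Int => if (x == 1) = true then '1' else '0') x = '0' := by simp [hx]
      simp only [List.map_cons, hxc]
      rw [show mySplit ('0' :: List.map (fun x => if (x == 1) = true then '1' else '0') xs)
            = [] :: mySplit (List.map (fun x => if (x == 1) = true then '1' else '0') xs) from by
          rw [mySplit, if_pos rfl]]
      simp only [List.modifyHead_cons, List.append_nil, List.filter_cons]
      have h0 := ih 0 le_rfl
      simp only [Int.toNat_zero, List.replicate_zero, List.nil_append] at h0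
      rw [show List.modifyHead (fun x => x) (mySplit (List.map (fun x => if (x == 1) = true then '1' else '0') xs))
            = mySplit (List.map (fun x => if (x == 1) = true then '1' else '0') xs) from by
          cases hms : mySplit (List.map (fun x => if (x == 1) = true then '1' else '0') xs) with
          | nil => exact absurd hms (mySplit_ne_nil _)
          | cons a as => simp] at h0
      by_cases h : c = 0
      · simp only [h, Int.toNat_zero, List.replicate_zero, decide_not]
        simp only [runsC, if_neg hx, if_neg (by simp : ¬ (0:Int) ≠ 0)]
        simpa using h0
      · have h1 : c.toNat ≠ 0 := by omega
        have hne : (List.replicate c.toNat '1') ≠ [] := by simp [h1]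
        rw [if_pos (by simpa using hne)]
        simp only [List.map_cons, List.length_replicate, Int.toNat_of_nonneg hc, runsC,
          if_neg hx, if_pos h]
        rw [h0]

lemma ports_agree (size : Int) (cc column : List Int) (h0 : 0 ≤ size) (h1 : size ≤ column.length) :
    check_column_fill size cc column = check_column_fill_alt size cc column := by
  unfold check_column_fill check_column_fill_alt
  have hxslen : (column.take size.toNat).length = size.toNat := by
    simp; omega
  have hcongr : (PySem.List.pyRange 0 size 1).foldl
      (fun (st : List Int × Int) i =>
        if PySem.List.pyGetD column i 0 == 1 then (st.1, st.2 + 1)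
        else if st.2 ≠ 0 then (st.1 ++ [st.2], 0) else st) ([], 0)
    = (PySem.List.pyRange 0 size 1).foldl
      (fun (st : List Int × Int) i =>
        if PySem.List.pyGetD (column.take size.toNat) i 0 == 1 then (st.1, st.2 + 1)
        else if st.2 ≠ 0 then (st.1 ++ [st.2], 0) else st) ([], 0) := by
    apply PySem.List.foldl_congr_mem
    intro acc i hi
    rw [PySem.List.mem_pyRange_one] at hi
    rw [PySem.List.pyGetD_eq_getElem column 0 hi.1 (by omega),
        PySem.List.pyGetD_eq_getElem (column.take size.toNat) 0 hi.1 (by rw [hxslen]; omega)]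
    rw [List.getElem_take]
  rw [hcongr]
  rw [show PySem.List.pyRange 0 size 1 = PySem.List.pyRange 0 ((column.take size.toNat).length : Int) 1 from by
    rw [hxslen, Int.toNat_of_nonneg h0]]
  rw [PySem.List.foldl_pyRange_zero_pyGetD' (column.take size.toNat) 0
      (fun (st : List Int × Int) v => if v == 1 then (st.1, st.2 + 1) else if st.2 ≠ 0 then (st.1 ++ [st.2], 0) else st) ([], 0)]
  rw [PySem.List.slice_to column h0]
  simp only [splitOn_eq]
  have hA := loopA_eq (column.take size.toNat) [] 0
  simp only [List.nil_append] at hA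
  rw [hA]
  have hB := runsB_eq (column.take size.toNat) 0 le_rfl
  simp only [Int.toNat_zero, List.replicate_zero, List.nil_append] at hB
  rw [show List.modifyHead (fun x => x)
        (mySplit (List.map (fun x => if (x == 1) = true then '1' else '0') (column.take size.toNat)))
      = mySplit (List.map (fun x => if (x == 1) = true then '1' else '0') (column.take size.toNat)) from by
      cases hms : mySplit (List.map (fun x => if (x == 1) = true then '1' else '0') (column.take size.toNat)) with
      | nil => exact absurd hms (mySplit_ne_nil _)
      | cons a as => simp] at hB
  rw [hB]

-- ===== VERDICT (by name: the statement is the Claim_ definition above) =====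
theorem check_column_fill_spec : Claim_equal_check_column_fill := by
  intro size cc column _ hpre
  unfold Spec_check_column_fill
  exact ports_agree size cc column hpre.1 hpre.2
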